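-- pv_equiv track=rewrite | github.com/gitgitWi/algo-quizzes--deprecated | MUST_REVIEW/Programmers/KAKAO/lv2-2018-17679.py | solution
-- ===== SOURCE A (Python) =====
-- def solution(m, n, board):
--
--     def splitX():
--         return list(map(lambda x: [i for i in x], board))
--
--     def setblockErasedBoard(board):
--         blockErased = board[:]
--         xRange, yRange = range(m-1), range(n-1)
--
--         def isBlock(x, y):
--             return not blockErased[x][y] == False and blockErased[x][y] == blockErased[x+1][y+1] == blockErased[x][y+1] == blockErased[x+1][y]
--         blockXY = [(x, y) for x in xRange for y in yRange if isBlock(x, y)]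
--
--         if len(blockXY) == 0:
--             return blockErased
--
--         fourWay = [(1, 1), (1, 0), (0, 0), (0, 1)]
--
--         def makeFourWayFalse(x, y):
--             for a, b in fourWay:
--                 blockErased[x+a][y+b] = False
--
--         for x, y in blockXY:
--             makeFourWayFalse(x, y)
--
--         def setBlockDown(x, y):
--             for upper in range(x-1, -1, -1):
--                 if upper >= 0 and blockErased[upper][y]:
--                     # TODO
--                     pass
--
--         def setFourWayBlockDown(x, y):
--             if x == m - 2:
--                 return
--             for a, b in fourWay:
--                 setBlockDown(x+a, y+b)
--
--         for x, y in blockXY: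
--             setFourWayBlockDown(x, y)
--
--         return setblockErasedBoard(blockErased)
--
--     splitedBoard = splitX()
--     finishedBoard = setblockErasedBoard(splitedBoard)
--
--     count = sum([1 for line in finishedBoard for x in line if x == False])
--     return count
-- ===== SOURCE B (Python) =====
-- def solution(m, n, board):
--     # One pass suffices: erasing never changes a surviving cell's character, so every
--     # 2x2 block of equal characters in the ORIGINAL board is erased in the first pass
--     # and no new block can appear afterwards.
--     erased = set()
--     for x in range(m - 1):
--         for y in range(n - 1):
--             c = board[x][y]
--             if c == board[x + 1][y + 1] == board[x][y + 1] == board[x + 1][y]: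
--                 erased.update(((x + 1, y + 1), (x + 1, y), (x, y), (x, y + 1)))
--     return len(erased)
-- ===== Notes on version B (the rewrite author's own statement) =====
-- stated objective: faster
-- what changed: A recursively re-scans and re-marks the grid until a fixpoint; since A's planned 'gravity' step is an empty TODO stub, erasing cells never creates a new 2x2 block, so B replaces the whole fixpoint recursion by a single scan of the original board that collects the coordinates of all 2x2 equal-character blocks into a set and returns its size.
import Mathlib
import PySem

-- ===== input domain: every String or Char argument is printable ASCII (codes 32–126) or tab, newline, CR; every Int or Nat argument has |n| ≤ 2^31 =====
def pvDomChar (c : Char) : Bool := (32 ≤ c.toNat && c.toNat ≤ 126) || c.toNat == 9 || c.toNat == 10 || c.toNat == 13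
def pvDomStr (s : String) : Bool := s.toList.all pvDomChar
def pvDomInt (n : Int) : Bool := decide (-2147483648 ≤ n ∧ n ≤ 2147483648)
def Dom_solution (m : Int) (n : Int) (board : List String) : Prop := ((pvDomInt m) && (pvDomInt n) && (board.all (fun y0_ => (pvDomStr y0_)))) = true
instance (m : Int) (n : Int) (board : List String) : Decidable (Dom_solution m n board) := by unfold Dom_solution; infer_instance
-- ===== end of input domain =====

-- B replaces A's recursive erase-until-fixpoint (whose 'gravity' step is an empty TODO stub,
-- so erasing never creates a new block) by a single scan that collects the coordinates of all
-- 2x2 equal-character blocks into a set: one pass over the board instead of repeated passes.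

-- ===== PORT A =====
-- A's grid cells are Python values "1-char string or False"; modelled as Option Char (none = False).
-- Python's `blockErased[x][y]` raises IndexError out of range; the getD defaults below are
-- unreachable on inputs admitted by Pre_solution.
def pvCellA (g : List (List (Option Char))) (x y : Int) : Option Char :=
  (PySem.List.pyGet? ((PySem.List.pyGet? g x).getD []) y).getD none

-- `not blockErased[x][y] == False and a == b == c == d` (chain = pairwise neighbours)
def pvIsBlock (g : List (List (Option Char))) (x y : Int) : Bool :=
  !(pvCellA g x y == none) && (pvCellA g x y == pvCellA g (x+1) (y+1))
    && (pvCellA g (x+1) (y+1) == pvCellA g x (y+1))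
    && (pvCellA g x (y+1) == pvCellA g (x+1) y)

-- [(x, y) for x in range(m-1) for y in range(n-1) if isBlock(x, y)]
def pvBlockXY (g : List (List (Option Char))) (m n : Int) : List (Int × Int) :=
  (PySem.List.pyRange 0 (m-1) 1).flatMap (fun x =>
    ((PySem.List.pyRange 0 (n-1) 1).filter (fun y => pvIsBlock g x y)).map (fun y => (x, y)))

def pvFourWay : List (Int × Int) := [(1,1), (1,0), (0,0), (0,1)]

-- blockErased[x][y] = False  (x, y are range values, hence nonnegative: toNat is exact)
def pvSetFalse (g : List (List (Option Char))) (x y : Int) : List (List (Option Char)) :=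
  g.modify x.toNat (fun row => row.set y.toNat none)

def pvMakeFourWayFalse (g : List (List (Option Char))) (x y : Int) : List (List (Option Char)) :=
  pvFourWay.foldl (fun h ab => pvSetFalse h (x + ab.1) (y + ab.2)) g

-- A's setBlockDown / setFourWayBlockDown loops have a `pass` (TODO) body: they compute nothing
-- and mutate nothing, so the recursive call is the next statement ported.
-- Python recursion carries no fuel; every recursive call erases at least one cell, so
-- (total number of cells + 1) steps always reach the fixpoint and the 0-fuel branch is dead.
def pvEraseLoop : Nat → Int → Int → List (List (Option Char)) → List (List (Option Char))
  | 0, _, _, g => g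
  | fuel+1, m, n, g =>
      let blockXY := pvBlockXY g m n
      if blockXY = [] then g
      else pvEraseLoop fuel m n (blockXY.foldl (fun h p => pvMakeFourWayFalse h p.1 p.2) g)

def solution (m : Int) (n : Int) (board : List String) : Int :=
  let splitedBoard := board.map (fun s => s.toList.map (fun c => some c))
  let finishedBoard := pvEraseLoop ((splitedBoard.map List.length).sum + 1) m n splitedBoard
  ((finishedBoard.flatMap (fun line => line.filter (fun x => x == none))).length : Int)

-- ===== PORT B =====
-- board[x][y]; the defaults are unreachable on inputs admitted by Pre_solution.
def pvChar (board : List String) (x y : Int) : Char :=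
  (PySem.Str.pyGet? ((PySem.List.pyGet? board x).getD "") y).getD ' '

def pvMatch (board : List String) (x y : Int) : Bool :=
  (pvChar board x y == pvChar board (x+1) (y+1))
    && (pvChar board (x+1) (y+1) == pvChar board x (y+1))
    && (pvChar board x (y+1) == pvChar board (x+1) y)

def solution_alt (m : Int) (n : Int) (board : List String) : Int :=
  let erased : PySem.Set (Int × Int) :=
    (PySem.List.pyRange 0 (m-1) 1).foldl (fun s x =>
      (PySem.List.pyRange 0 (n-1) 1).foldl (fun s y =>
        if pvMatch board x y then
          (((s.add (x+1, y+1)).add (x+1, y)).add (x, y)).add (x, y+1)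
        else s) s) PySem.Set.empty
  (erased.length : Int)

-- ===== PRECONDITION & SPEC =====
-- Exactly the inputs where A returns: when both ranges are nonempty (m ≥ 2 and n ≥ 2) the scan
-- indexes rows 0..m-1 and columns 0..n-1, raising IndexError unless the board has at least m
-- rows and each of the first m rows at least n characters; otherwise A never indexes.
def Pre_solution (m : Int) (n : Int) (board : List String) : Prop :=
  2 ≤ m → 2 ≤ n →
    (m ≤ (board.length : Int) ∧ ∀ s ∈ board.take m.toNat, n ≤ (s.toList.length : Int))
instance (m : Int) (n : Int) (board : List String) : Decidable (Pre_solution m n board) := by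
  unfold Pre_solution; infer_instance

def pvWitness_solution : Int × Int × List String := (2, 2, ["ab", "cb"])

def Spec_solution (m : Int) (n : Int) (board : List String) (out : Int) : Prop :=
  out = solution_alt m n board
instance (m : Int) (n : Int) (board : List String) (out : Int) : Decidable (Spec_solution m n board out) := by
  unfold Spec_solution; infer_instance

-- ===== CLAIM (what is proved, stated in full; the proofs are below) =====
def Claim_equal_solution : Prop := ∀ (m : Int) (n : Int) (board : List String), Dom_solution m n board → Pre_solution m n board → Spec_solution m n board (solution m n board)

-- ===== LEMMAS AND PROOFS =====

-- the lifted start grid, cell access and the none-cell count, on Nat coordinates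
def pvLift (board : List String) : List (List (Option Char)) :=
  board.map (fun s => s.toList.map (fun c => some c))

def pvCel (g : List (List (Option Char))) (i j : Nat) : Option Char :=
  (g.getD i []).getD j none

def pvCnt (g : List (List (Option Char))) : Nat :=
  (g.flatMap (fun line => line.filter (fun x => x == none))).length

-- (p.1, p.2) is an in-grid coordinate of g0
def pvValid (g0 : List (List (Option Char))) (p : Int × Int) : Prop :=
  0 ≤ p.1 ∧ 0 ≤ p.2 ∧ p.1.toNat < g0.length ∧ p.2.toNat < (g0.getD p.1.toNat []).length

-- all four corners of the square at p are in-grid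
def pvSquareOK (g0 : List (List (Option Char))) (p : Int × Int) : Prop :=
  pvValid g0 (p.1, p.2) ∧ pvValid g0 (p.1, p.2+1) ∧ pvValid g0 (p.1+1, p.2) ∧ pvValid g0 (p.1+1, p.2+1)

-- the running relation between A's mutated grid and B's erased set
def pvInv (g0 g : List (List (Option Char))) (S : List (Int × Int)) : Prop :=
  g.length = g0.length ∧
  (∀ i : Nat, (g.getD i []).length = (g0.getD i []).length) ∧
  S.Nodup ∧ (∀ p ∈ S, pvValid g0 p) ∧
  (∀ i j : Nat, pvCel g i j = if ((i : Int), (j : Int)) ∈ S then none else pvCel g0 i j) ∧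
  pvCnt g = S.length

def pvAdd4 (S : PySem.Set (Int × Int)) (p : Int × Int) : PySem.Set (Int × Int) :=
  (((S.add (p.1+1, p.2+1)).add (p.1+1, p.2)).add (p.1, p.2)).add (p.1, p.2+1)

lemma pvCellA_natCast (g : List (List (Option Char))) (i j : Nat) :
    pvCellA g (i : Int) (j : Int) = pvCel g i j := by
  simp [pvCellA, pvCel, List.getD_eq_getElem?_getD]

lemma pvCellA_toNat (g : List (List (Option Char))) (x y : Int) (hx : 0 ≤ x) (hy : 0 ≤ y) :
    pvCellA g x y = pvCel g x.toNat y.toNat := by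
  rw [← pvCellA_natCast, Int.toNat_of_nonneg hx, Int.toNat_of_nonneg hy]

lemma pvLen_setFalse (g : List (List (Option Char))) (x y : Int) :
    (pvSetFalse g x y).length = g.length := by simp [pvSetFalse]

lemma pvCel_lift_valid (board : List String) (p : Int × Int) (h : pvValid (pvLift board) p) :
    pvCel (pvLift board) p.1.toNat p.2.toNat ≠ none := by
  obtain ⟨-, -, hi, hj⟩ := h
  unfold pvCel
  rw [List.getD_eq_getElem _ _ hi] at hj ⊢
  rw [List.getD_eq_getElem _ _ hj]
  simp only [pvLift, List.length_map] at hi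
  simp [pvLift, List.getElem_map]

lemma pvCnt_lift (board : List String) : pvCnt (pvLift board) = 0 := by
  simp only [pvCnt, pvLift, List.length_flatMap, List.map_map]
  refine List.sum_eq_zero ?_
  intro x hx
  simp only [List.mem_map] at hx
  obtain ⟨s, -, rfl⟩ := hx
  simp [List.filter_map, Function.comp]

lemma pvCel_setFalse (g : List (List (Option Char))) (x y : Int) (i j : Nat)
    (hi : x.toNat < g.length) (hj : y.toNat < (g.getD x.toNat []).length) :
    pvCel (pvSetFalse g x y) i j = if x.toNat = i ∧ y.toNat = j then none else pvCel g i j := by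
  rw [List.getD_eq_getElem _ _ hi] at hj
  simp only [pvCel, pvSetFalse, List.getD_eq_getElem?_getD, List.getElem?_modify]
  by_cases hix : x.toNat = i
  · subst hix
    rw [List.getElem?_eq_getElem hi]
    by_cases hjy : y.toNat = j
    · subst hjy
      simp [List.getElem?_set_self hj]
    · simp [hjy, List.getElem?_set_ne hjy]
  · simp only [hix, if_false, false_and]
    cases g[i]? <;> simp

lemma pvRowLen_setFalse (g : List (List (Option Char))) (x y : Int) (i : Nat) :
    ((pvSetFalse g x y).getD i []).length = (g.getD i []).length := by
  simp only [pvSetFalse, List.getD_eq_getElem?_getD, List.getElem?_modify]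
  cases h : g[i]? <;> simp
  split <;> simp

lemma pvRowCnt_set (r : List (Option Char)) (j : Nat) (hj : j < r.length) :
    ((r.set j none).filter (fun x => x == none)).length =
      if r[j] = none then (r.filter (fun x => x == none)).length
      else (r.filter (fun x => x == none)).length + 1 := by
  have hr : r = r.take j ++ r[j] :: r.drop (j+1) := by
    rw [List.getElem_cons_drop hj, List.take_append_drop]
  have hsplit : r.filter (fun x => x == none) =
      (r.take j).filter (fun x => x == none) ++ (r[j] :: r.drop (j+1)).filter (fun x => x == none) := by
    conv_lhs => rw [hr]
    rw [List.filter_append]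
  rw [List.set_eq_take_append_cons_drop, if_pos hj, hsplit]
  cases h : r[j]
  · simp [List.filter_append]
  · simp [List.filter_append]
    omega

lemma pvCnt_append (A B : List (List (Option Char))) :
    pvCnt (A ++ B) = pvCnt A + pvCnt B := by
  simp [pvCnt, List.flatMap_append]

lemma pvCnt_cons (r : List (Option Char)) (B : List (List (Option Char))) :
    pvCnt (r :: B) = (r.filter (fun x => x == none)).length + pvCnt B := by
  simp [pvCnt, List.flatMap_cons]

lemma pvCnt_setFalse (g : List (List (Option Char))) (x y : Int)
    (hi : x.toNat < g.length) (hj : y.toNat < (g.getD x.toNat []).length) :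
    pvCnt (pvSetFalse g x y) =
      if pvCel g x.toNat y.toNat = none then pvCnt g else pvCnt g + 1 := by
  rw [List.getD_eq_getElem _ _ hi] at hj
  have hcel : pvCel g x.toNat y.toNat = g[x.toNat][y.toNat] := by
    rw [pvCel, List.getD_eq_getElem _ _ hi, List.getD_eq_getElem _ _ hj]
  have hg : g = g.take x.toNat ++ g[x.toNat] :: g.drop (x.toNat+1) := by
    rw [List.getElem_cons_drop hi, List.take_append_drop]
  have hsum : pvCnt g = pvCnt (g.take x.toNat) +
      ((g[x.toNat].filter (fun x => x == none)).length + pvCnt (g.drop (x.toNat+1))) := by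
    conv_lhs => rw [hg]
    rw [pvCnt_append, pvCnt_cons]
  rw [pvSetFalse, List.modify_eq_set_get _ hi, List.set_eq_take_append_cons_drop, if_pos hi]
  rw [pvCnt_append, pvCnt_cons]
  simp only [List.get_eq_getElem]
  rw [pvRowCnt_set _ _ hj, hcel, hsum]
  by_cases hc : g[x.toNat][y.toNat] = none
  · simp [hc]
  · simp [hc]
    omega

lemma pvInv_step (g0 g : List (List (Option Char))) (S : List (Int × Int)) (c : Int × Int)
    (hg0 : ∀ p, pvValid g0 p → pvCel g0 p.1.toNat p.2.toNat ≠ none)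
    (hv : pvValid g0 c) (h : pvInv g0 g S) :
    pvInv g0 (pvSetFalse g c.1 c.2) (PySem.Set.add S c) := by
  obtain ⟨hlen, hrow, hnd, hval, hchar, hcnt⟩ := h
  obtain ⟨hc1, hc2, hi0, hj0⟩ := hv
  have hi : c.1.toNat < g.length := by rw [hlen]; exact hi0
  have hj : c.2.toNat < (g.getD c.1.toNat []).length := by rw [hrow]; exact hj0
  have hcoord : ((c.1.toNat : Int), (c.2.toNat : Int)) = c := by
    simp [Int.toNat_of_nonneg hc1, Int.toNat_of_nonneg hc2]
  refine ⟨?_, ?_, PySem.Set.nodup_add _ _ hnd, ?_, ?_, ?_⟩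
  · rw [pvLen_setFalse, hlen]
  · intro i; rw [pvRowLen_setFalse]; exact hrow i
  · intro p hp
    rcases (PySem.Set.mem_add _ _ _).1 hp with h' | rfl
    · exact hval p h'
    · exact ⟨hc1, hc2, hi0, hj0⟩
  · intro i j
    rw [pvCel_setFalse g c.1 c.2 i j hi hj, hchar i j]
    by_cases hmem : ((i : Int), (j : Int)) ∈ S
    · have : ((i : Int), (j : Int)) ∈ PySem.Set.add S c := (PySem.Set.mem_add _ _ _).2 (Or.inl hmem)
      simp only [hmem, if_pos, this]
      split <;> rfl
    · by_cases hij : c.1.toNat = i ∧ c.2.toNat = j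
      · have heq : ((i : Int), (j : Int)) = c := by rw [← hcoord, hij.1, hij.2]
        have : ((i : Int), (j : Int)) ∈ PySem.Set.add S c := (PySem.Set.mem_add _ _ _).2 (Or.inr heq)
        simp [hij, hmem, this]
      · have hne : ((i : Int), (j : Int)) ≠ c := by
          rw [← hcoord]
          simp only [ne_eq, Prod.mk.injEq, not_and]
          intro h1
          have : c.1.toNat = i := by exact_mod_cast h1.symm
          intro h2
          exact hij ⟨this, by exact_mod_cast h2.symm⟩
        have : ((i : Int), (j : Int)) ∉ PySem.Set.add S c := by
          rw [PySem.Set.mem_add]; tauto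
        simp [hij, hmem, this]
  · rw [pvCnt_setFalse g c.1 c.2 hi hj, hcnt, hchar c.1.toNat c.2.toNat, hcoord]
    by_cases hmem : c ∈ S
    · simp [hmem, PySem.Set.add_of_mem hmem]
    · have hne := hg0 c ⟨hc1, hc2, hi0, hj0⟩
      simp [hmem, hne]

lemma pvInv_square (g0 g : List (List (Option Char))) (S : List (Int × Int)) (p : Int × Int)
    (hg0 : ∀ q, pvValid g0 q → pvCel g0 q.1.toNat q.2.toNat ≠ none)
    (hok : pvSquareOK g0 p) (h : pvInv g0 g S) :
    pvInv g0 (pvMakeFourWayFalse g p.1 p.2) (pvAdd4 S p) := by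
  obtain ⟨h00, h01, h10, h11⟩ := hok
  simp only [pvMakeFourWayFalse, pvFourWay, pvAdd4, List.foldl_cons, List.foldl_nil, add_zero]
  exact pvInv_step g0 _ _ (p.1, p.2+1) hg0 h01
    (pvInv_step g0 _ _ (p.1, p.2) hg0 h00
      (pvInv_step g0 _ _ (p.1+1, p.2) hg0 h10
        (pvInv_step g0 _ _ (p.1+1, p.2+1) hg0 h11 h)))

lemma pvInv_foldl (g0 : List (List (Option Char))) (L : List (Int × Int))
    (hg0 : ∀ q, pvValid g0 q → pvCel g0 q.1.toNat q.2.toNat ≠ none)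
    (hok : ∀ p ∈ L, pvSquareOK g0 p) :
    ∀ (g : List (List (Option Char))) (S : List (Int × Int)), pvInv g0 g S →
      pvInv g0 (L.foldl (fun h p => pvMakeFourWayFalse h p.1 p.2) g) (L.foldl pvAdd4 S) := by
  induction L with
  | nil => intro g S h; simpa using h
  | cons q L ih =>
    intro g S h
    simp only [List.foldl_cons]
    exact ih (fun p hp => hok p (List.mem_cons_of_mem _ hp)) _ _
      (pvInv_square g0 g S q hg0 (hok q (List.mem_cons_self)) h)

lemma pvMem_add4_self (S : PySem.Set (Int × Int)) (p : Int × Int) : p ∈ pvAdd4 S p := by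
  simp only [pvAdd4, PySem.Set.mem_add]
  tauto

lemma pvMem_foldl_add4_of_mem_init (L : List (Int × Int)) (S : PySem.Set (Int × Int))
    (q : Int × Int) (h : q ∈ S) : q ∈ L.foldl pvAdd4 S := by
  induction L generalizing S with
  | nil => simpa using h
  | cons r L ih =>
    simp only [List.foldl_cons]
    apply ih
    simp only [pvAdd4, PySem.Set.mem_add]
    tauto

lemma pvMem_foldl_add4 (L : List (Int × Int)) (S : PySem.Set (Int × Int))
    (p : Int × Int) (h : p ∈ L) : p ∈ L.foldl pvAdd4 S := by
  induction L generalizing S with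
  | nil => cases h
  | cons r L ih =>
    simp only [List.foldl_cons]
    rcases List.mem_cons.1 h with rfl | h'
    · exact pvMem_foldl_add4_of_mem_init L _ p (pvMem_add4_self S p)
    · exact ih (pvAdd4 S r) h'

lemma pvMem_blockXY (g : List (List (Option Char))) (m n : Int) (p : Int × Int) :
    p ∈ pvBlockXY g m n ↔
      0 ≤ p.1 ∧ p.1 < m - 1 ∧ 0 ≤ p.2 ∧ p.2 < n - 1 ∧ pvIsBlock g p.1 p.2 = true := by
  simp only [pvBlockXY, List.mem_flatMap, List.mem_map, List.mem_filter,
    PySem.List.mem_pyRange_one]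
  constructor
  · rintro ⟨x, ⟨hx1, hx2⟩, y, ⟨⟨hy1, hy2⟩, hb⟩, rfl⟩
    exact ⟨hx1, hx2, hy1, hy2, hb⟩
  · rintro ⟨h1, h2, h3, h4, h5⟩
    exact ⟨p.1, ⟨h1, h2⟩, p.2, ⟨⟨h3, h4⟩, h5⟩, rfl⟩

lemma pvBlockXY_after (g0 g : List (List (Option Char))) (S : List (Int × Int)) (m n : Int)
    (h : pvInv g0 g S) (hclosed : ∀ p ∈ pvBlockXY g0 m n, p ∈ S) :
    pvBlockXY g m n = [] := by
  obtain ⟨-, -, -, -, hchar, -⟩ := h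
  have key : ∀ u v : Int, 0 ≤ u → 0 ≤ v → pvCellA g u v ≠ none →
      ((u, v) ∉ S ∧ pvCellA g0 u v = pvCellA g u v) := by
    intro u v hu hv hne
    have hcast : ((u.toNat : Int), (v.toNat : Int)) = (u, v) := by
      simp [Int.toNat_of_nonneg hu, Int.toNat_of_nonneg hv]
    rw [pvCellA_toNat g u v hu hv, hchar u.toNat v.toNat, hcast] at hne
    by_cases hmem : (u, v) ∈ S
    · simp [hmem] at hne
    · rw [if_neg hmem] at hne
      refine ⟨hmem, ?_⟩
      rw [pvCellA_toNat g0 u v hu hv, pvCellA_toNat g u v hu hv,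
        hchar u.toNat v.toNat, hcast, if_neg hmem]
  rw [List.eq_nil_iff_forall_not_mem]
  intro p hp
  rw [pvMem_blockXY] at hp
  obtain ⟨hx0, hx1, hy0, hy1, hb⟩ := hp
  simp only [pvIsBlock, Bool.and_eq_true, Bool.not_eq_eq_eq_not, Bool.not_true, beq_iff_eq,
    beq_eq_false_iff_ne, ne_eq] at hb
  obtain ⟨⟨⟨ha, hab⟩, hbc⟩, hcd⟩ := hb
  have hAne : pvCellA g p.1 p.2 ≠ none := by
    intro hcon; rw [hcon] at ha; simp at ha
  have hBne : pvCellA g (p.1+1) (p.2+1) ≠ none := by rw [← hab]; exact hAne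
  have hCne : pvCellA g p.1 (p.2+1) ≠ none := by rw [← hbc]; exact hBne
  have hDne : pvCellA g (p.1+1) p.2 ≠ none := by rw [← hcd]; exact hCne
  obtain ⟨hAnot, hAeq⟩ := key p.1 p.2 hx0 hy0 hAne
  obtain ⟨-, hBeq⟩ := key (p.1+1) (p.2+1) (by omega) (by omega) hBne
  obtain ⟨-, hCeq⟩ := key p.1 (p.2+1) hx0 (by omega) hCne
  obtain ⟨-, hDeq⟩ := key (p.1+1) p.2 (by omega) hy0 hDne
  have hb0 : pvIsBlock g0 p.1 p.2 = true := by
    simp only [pvIsBlock, hAeq, hBeq, hCeq, hDeq, Bool.and_eq_true, Bool.not_eq_eq_eq_not,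
      Bool.not_true, beq_iff_eq, beq_eq_false_iff_ne, ne_eq]
    exact ⟨⟨⟨ha, hab⟩, hbc⟩, hcd⟩
  exact hAnot (hclosed p ((pvMem_blockXY g0 m n p).2 ⟨hx0, hx1, hy0, hy1, hb0⟩))

lemma pvValid_of_bounds (m n : Int) (board : List String)
    (hm : m ≤ (board.length : Int))
    (hn : ∀ s ∈ board.take m.toNat, n ≤ (s.toList.length : Int))
    (u v : Int) (hu0 : 0 ≤ u) (hu : u < m) (hv0 : 0 ≤ v) (hv : v < n) :
    pvValid (pvLift board) (u, v) := by
  have hub : u.toNat < board.length := by omega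
  have hmem : board[u.toNat] ∈ board.take m.toNat := by
    have hmm : u.toNat < (board.take m.toNat).length := by
      simp only [List.length_take]; omega
    have h2 := List.getElem_mem hmm
    rwa [List.getElem_take] at h2
  have hrow := hn _ hmem
  refine ⟨hu0, hv0, ?_, ?_⟩
  · simpa [pvLift] using hub
  · have : (pvLift board).getD u.toNat [] = board[u.toNat].toList.map (fun c => some c) := by
      rw [pvLift, List.getD_eq_getElem _ _ (by simpa [pvLift] using hub)]
      simp
    rw [this, List.length_map]
    omega

lemma pvCellA_lift (board : List String) (u v : Int) (h : pvValid (pvLift board) (u, v)) :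
    pvCellA (pvLift board) u v = some (pvChar board u v) := by
  obtain ⟨hu0', hv0', hi, hj⟩ := h
  have hu0 : 0 ≤ u := hu0'
  have hv0 : 0 ≤ v := hv0'
  simp only [pvLift, List.length_map] at hi
  have hrow : (pvLift board).getD u.toNat [] = board[u.toNat].toList.map (fun c => some c) := by
    rw [pvLift, List.getD_eq_getElem _ _ (by simpa [pvLift] using hi)]
    simp
  rw [hrow, List.length_map] at hj
  rw [pvCellA_toNat _ _ _ hu0 hv0, pvCel, hrow, List.getD_eq_getElem _ _ (by simpa using hj)]
  rw [List.getElem_map]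
  congr 1
  rw [pvChar]
  rw [PySem.List.pyGet?_of_nonneg _ hu0, List.getElem?_eq_getElem hi]
  simp only [Option.getD_some]
  rw [show PySem.Str.pyGet? board[u.toNat] v = PySem.List.pyGet? board[u.toNat].toList v from rfl,
    PySem.List.pyGet?_of_nonneg _ hv0, List.getElem?_eq_getElem hj]
  rfl

lemma pvMatch_eq_isBlock (m n : Int) (board : List String)
    (hm : m ≤ (board.length : Int))
    (hn : ∀ s ∈ board.take m.toNat, n ≤ (s.toList.length : Int))
    (x y : Int) (hx0 : 0 ≤ x) (hx : x < m - 1) (hy0 : 0 ≤ y) (hy : y < n - 1) :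
    pvMatch board x y = pvIsBlock (pvLift board) x y := by
  have c00 := pvCellA_lift board x y
    (pvValid_of_bounds m n board hm hn x y hx0 (by omega) hy0 (by omega))
  have c11 := pvCellA_lift board (x+1) (y+1)
    (pvValid_of_bounds m n board hm hn (x+1) (y+1) (by omega) (by omega) (by omega) (by omega))
  have c01 := pvCellA_lift board x (y+1)
    (pvValid_of_bounds m n board hm hn x (y+1) hx0 (by omega) (by omega) (by omega))
  have c10 := pvCellA_lift board (x+1) y
    (pvValid_of_bounds m n board hm hn (x+1) y (by omega) (by omega) hy0 (by omega))
  rw [pvIsBlock, c00, c11, c01, c10, pvMatch]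
  simp

lemma pvCel_ne_none_bounds (g : List (List (Option Char))) (i j : Nat)
    (h : pvCel g i j ≠ none) : i < g.length ∧ j < (g.getD i []).length := by
  by_cases hi : i < g.length
  · refine ⟨hi, ?_⟩
    by_cases hj : j < (g.getD i []).length
    · exact hj
    · exact absurd (by rw [pvCel, List.getD_eq_getElem?_getD, List.getElem?_eq_none (by omega)]; rfl) h
  · exact absurd (by rw [pvCel, List.getD_eq_getElem?_getD (l := g), List.getElem?_eq_none (by omega)]; rfl) h

lemma pvSolution_alt_eq (m n : Int) (board : List String)
    (hcong : ∀ x y : Int, 0 ≤ x → x < m - 1 → 0 ≤ y → y < n - 1 →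
      pvMatch board x y = pvIsBlock (pvLift board) x y) :
    solution_alt m n board =
      (((pvBlockXY (pvLift board) m n).foldl pvAdd4 PySem.Set.empty).length : Int) := by
  have hset : ((PySem.List.pyRange 0 (m-1) 1).foldl (fun s x =>
      (PySem.List.pyRange 0 (n-1) 1).foldl (fun s y =>
        if pvMatch board x y then
          (((s.add (x+1, y+1)).add (x+1, y)).add (x, y)).add (x, y+1)
        else s) s) (PySem.Set.empty : PySem.Set (Int × Int)))
      = (pvBlockXY (pvLift board) m n).foldl pvAdd4 PySem.Set.empty := by
    rw [pvBlockXY, List.foldl_flatMap]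
    apply PySem.List.foldl_congr_mem
    intro acc x hx
    rw [List.foldl_map,
      ← PySem.List.foldl_if_eq_foldl_filter (fun y => pvIsBlock (pvLift board) x y)
        (fun s y => pvAdd4 s (x, y))]
    apply PySem.List.foldl_congr_mem
    intro acc2 y hy
    rw [PySem.List.mem_pyRange_one] at hx hy
    rw [hcong x y hx.1 (by omega) hy.1 (by omega)]
    rfl
  simp only [solution_alt]
  rw [hset]

lemma pvMain (m : Int) (n : Int) (board : List String)
    (hpre : Pre_solution m n board) : solution m n board = solution_alt m n board := by
  have hg0 : ∀ q, pvValid (pvLift board) q → pvCel (pvLift board) q.1.toNat q.2.toNat ≠ none :=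
    fun q hq => pvCel_lift_valid board q hq
  have hcong : ∀ x y : Int, 0 ≤ x → x < m - 1 → 0 ≤ y → y < n - 1 →
      pvMatch board x y = pvIsBlock (pvLift board) x y := by
    intro x y hx0 hx1 hy0 hy1
    obtain ⟨hA, hB⟩ := hpre (by omega) (by omega)
    exact pvMatch_eq_isBlock m n board hA hB x y hx0 hx1 hy0 hy1
  have hOK : ∀ p ∈ pvBlockXY (pvLift board) m n, pvSquareOK (pvLift board) p := by
    intro p hp
    rw [pvMem_blockXY] at hp
    obtain ⟨h1, h2, h3, h4, -⟩ := hp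
    obtain ⟨hA, hB⟩ := hpre (by omega) (by omega)
    exact ⟨pvValid_of_bounds m n board hA hB p.1 p.2 h1 (by omega) h3 (by omega),
      pvValid_of_bounds m n board hA hB p.1 (p.2+1) h1 (by omega) (by omega) (by omega),
      pvValid_of_bounds m n board hA hB (p.1+1) p.2 (by omega) (by omega) h3 (by omega),
      pvValid_of_bounds m n board hA hB (p.1+1) (p.2+1) (by omega) (by omega) (by omega) (by omega)⟩
  have hInv0 : pvInv (pvLift board) (pvLift board) [] := by
    refine ⟨rfl, fun _ => rfl, List.nodup_nil, by simp, by simp, by simp [pvCnt_lift]⟩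
  have hInvF := pvInv_foldl (pvLift board) (pvBlockXY (pvLift board) m n) hg0 hOK
    (pvLift board) [] hInv0
  have hclosed : ∀ p ∈ pvBlockXY (pvLift board) m n,
      p ∈ (pvBlockXY (pvLift board) m n).foldl pvAdd4 [] :=
    fun p hp => pvMem_foldl_add4 _ _ p hp
  have hEmpty := pvBlockXY_after (pvLift board) _ _ m n hInvF hclosed
  -- the recursion computes exactly one marking pass
  have hloop : pvEraseLoop (((pvLift board).map List.length).sum + 1) m n (pvLift board) =
      (pvBlockXY (pvLift board) m n).foldl (fun h p => pvMakeFourWayFalse h p.1 p.2)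
        (pvLift board) := by
    rw [pvEraseLoop]
    by_cases hnil : pvBlockXY (pvLift board) m n = []
    · rw [if_pos hnil, hnil, List.foldl_nil]
    · rw [if_neg hnil]
      obtain ⟨p, hp⟩ := List.exists_mem_of_ne_nil _ hnil
      have hb := ((pvMem_blockXY _ m n p).1 hp)
      have hne : pvCellA (pvLift board) p.1 p.2 ≠ none := by
        have := hb.2.2.2.2
        simp only [pvIsBlock, Bool.and_eq_true, Bool.not_eq_eq_eq_not, Bool.not_true,
          beq_eq_false_iff_ne, ne_eq] at this
        exact this.1.1.1
      rw [pvCellA_toNat _ _ _ hb.1 hb.2.2.1] at hne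
      obtain ⟨hi, hj⟩ := pvCel_ne_none_bounds _ _ _ hne
      have hsum : 1 ≤ ((pvLift board).map List.length).sum := by
        have hmem : ((pvLift board).getD p.1.toNat []).length ∈ (pvLift board).map List.length := by
          rw [List.getD_eq_getElem _ _ hi]
          exact List.mem_map_of_mem (List.getElem_mem hi)
        have := List.le_sum_of_mem hmem
        omega
      obtain ⟨t, ht⟩ : ∃ t, ((pvLift board).map List.length).sum = t + 1 :=
        ⟨((pvLift board).map List.length).sum - 1, by omega⟩
      rw [ht, pvEraseLoop, if_pos hEmpty]
  have hcnt := hInvF.2.2.2.2.2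
  have hA : solution m n board =
      ((pvBlockXY (pvLift board) m n).foldl pvAdd4 ([] : List (Int × Int))).length := by
    simp only [solution]
    rw [show board.map (fun s => s.toList.map (fun c => some c)) = pvLift board from rfl, hloop]
    rw [show (List.flatMap (fun line => List.filter (fun x => x == none) line)
        (List.foldl (fun h p => pvMakeFourWayFalse h p.1 p.2) (pvLift board)
          (pvBlockXY (pvLift board) m n))).length
      = pvCnt (List.foldl (fun h p => pvMakeFourWayFalse h p.1 p.2) (pvLift board)
          (pvBlockXY (pvLift board) m n)) from rfl, hcnt]
  rw [hA, pvSolution_alt_eq m n board hcong]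
  rfl

-- ===== VERDICT (by name: the statement is the Claim_ definition above) =====
theorem solution_spec : Claim_equal_solution := by
  intro m n board _ hpre
  exact pvMain m n board hpre
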